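-- pv_equiv track=rewrite | github.com/mxd1760/VirtualRubiksCube | cube.py | left_2d_arr
-- ===== SOURCE A (Python) =====
-- def left_2d_arr(arr):
--   out = []
--   l = len(arr)
--   l2 = len(arr[0])
--   for i in range(l2):
--     for j in range(l):
--       out.append(arr[j][l2-1-i])
--   return out
-- ===== SOURCE B (Python) =====
-- def left_2d_arr(arr):
--     # single row-major pass building column buckets, then reverse-and-flatten
--     cols = [[] for _ in range(len(arr[0]))]
--     for row in arr:
--         for c, x in zip(cols, row):
--             c.append(x)
--     return [x for col in reversed(cols) for x in col]
-- ===== Notes on version B (the rewrite author's own statement) =====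
-- stated objective: alternative
-- what changed: Replaces A's column-major double index loop (range over columns, inner range over rows with arithmetic index l2-1-i) by a single row-major pass that distributes each row into per-column buckets via zip, then reverses the bucket list and flattens it.
import Mathlib
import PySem

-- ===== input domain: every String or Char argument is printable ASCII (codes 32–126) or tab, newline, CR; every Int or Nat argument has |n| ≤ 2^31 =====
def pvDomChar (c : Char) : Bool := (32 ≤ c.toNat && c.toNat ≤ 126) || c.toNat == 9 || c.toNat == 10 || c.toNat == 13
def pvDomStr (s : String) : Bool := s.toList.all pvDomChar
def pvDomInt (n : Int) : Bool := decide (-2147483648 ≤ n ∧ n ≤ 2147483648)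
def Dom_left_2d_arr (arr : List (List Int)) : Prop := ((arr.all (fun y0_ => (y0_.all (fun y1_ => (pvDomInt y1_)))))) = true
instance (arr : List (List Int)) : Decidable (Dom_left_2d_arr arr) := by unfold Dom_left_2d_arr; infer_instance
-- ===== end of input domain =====

-- B replaces A's column-major double index loop by one row-major pass into per-column
-- buckets (zip) followed by reverse-and-flatten; same return value wherever A returns.

-- ===== PORT A =====
def left_2d_arr (arr : List (List Int)) : List Int :=
  let l : Int := arr.length
  let l2 : Int := ((PySem.List.pyGet? arr 0).getD []).length
  (PySem.List.pyRange 0 l2 1).foldl (fun out i =>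
    (PySem.List.pyRange 0 l 1).foldl (fun out j =>
      out ++ [PySem.List.pyGetD (PySem.List.pyGetD arr j []) (l2 - 1 - i) 0]) out) []

-- ===== PORT B =====
def left_2d_arr_alt (arr : List (List Int)) : List Int :=
  let l2 : Int := ((PySem.List.pyGet? arr 0).getD []).length
  let cols0 : List (List Int) := (PySem.List.pyRange 0 l2 1).map (fun _ => ([] : List Int))
  let cols := arr.foldl (fun cs row =>
    List.zipWith (fun c x => c ++ [x]) cs row ++ cs.drop row.length) cols0
  cols.reverse.foldl (fun out col => out ++ col) []

-- ===== PRECONDITION & SPEC =====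
-- Pre_ is exactly the set of inputs on which A returns: A raises IndexError on an empty
-- array (arr[0]) and whenever the first row is longer than some other row (arr[j][l2-1-i]).
def Pre_left_2d_arr (arr : List (List Int)) : Prop :=
  arr ≠ [] ∧ ∀ row ∈ arr, (arr.headD []).length ≤ row.length
instance (arr : List (List Int)) : Decidable (Pre_left_2d_arr arr) := by
  unfold Pre_left_2d_arr; infer_instance
def pvWitness_left_2d_arr : List (List Int) := [[1, 2, 3], [4, 5, 6]]
def Spec_left_2d_arr (arr : List (List Int)) (out : List Int) : Prop := out = left_2d_arr_alt arr
instance (arr : List (List Int)) (out : List Int) : Decidable (Spec_left_2d_arr arr out) := by unfold Spec_left_2d_arr; infer_instance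

-- ===== CLAIM (what is proved, stated in full; the proofs are below) =====
def Claim_equal_left_2d_arr : Prop := ∀ (arr : List (List Int)), Dom_left_2d_arr arr → Pre_left_2d_arr arr → Spec_left_2d_arr arr (left_2d_arr arr)

-- ===== LEMMAS AND PROOFS =====

-- column m of arr (rows assumed long enough)
def pvCol (arr : List (List Int)) (m : Nat) : List Int := arr.map (fun row => row.getD m 0)

lemma map_getD_range (cols : List (List Int)) :
    (List.range cols.length).map (fun k => cols.getD k []) = cols := by
  apply List.ext_getElem
  · simp
  · intro i h1 h2
    simp only [List.length_map, List.length_range] at h1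
    simp [List.getD, h1]

lemma getD_map_const {α : Type} (l : List α) (k : Nat) :
    (l.map (fun _ => ([] : List Int))).getD k [] = [] := by
  simp only [List.getD, List.getElem?_map]
  cases l[k]? <;> simp

-- invariant of B's row-major pass
lemma foldl_cols (arr : List (List Int)) (n : Nat) (cols : List (List Int))
    (hlen : cols.length = n) (h : ∀ row ∈ arr, n ≤ row.length) :
    arr.foldl (fun cs row => List.zipWith (fun c x => c ++ [x]) cs row ++ cs.drop row.length) cols
      = (List.range n).map (fun k => cols.getD k [] ++ pvCol arr k) := by
  induction arr generalizing cols with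
  | nil =>
      simp only [List.foldl_nil, pvCol, List.map_nil, List.append_nil]
      rw [← hlen, map_getD_range]
  | cons row rest ih =>
      have hrow : n ≤ row.length := h row (by simp)
      have hdrop : cols.drop row.length = [] := by
        apply List.drop_eq_nil_of_le; omega
      have hlen' : (List.zipWith (fun c x => c ++ [x]) cols row ++ cols.drop row.length).length = n := by
        simp [List.length_zipWith, hlen, hdrop]; omega
      rw [List.foldl_cons, ih _ hlen' (fun r hr => h r (by simp [hr]))]
      simp only [hdrop, List.append_nil]
      apply List.map_congr_left
      intro k hk
      simp only [List.mem_range] at hk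
      have hk1 : k < cols.length := by omega
      have hk2 : k < row.length := by omega
      have hk3 : k < (List.zipWith (fun c x => c ++ [x]) cols row).length := by
        simp [List.length_zipWith]; omega
      have : (List.zipWith (fun c x => c ++ [x]) cols row).getD k []
          = cols[k] ++ [row[k]] := by
        rw [List.getD, List.getElem?_eq_getElem hk3]
        simp [List.getElem_zipWith]
      rw [this]
      simp [pvCol, List.getD, hk1, hk2]

lemma map_sub_range (n : Nat) :
    (List.range n).map (fun k => n - 1 - k) = (List.range n).reverse := by
  apply List.ext_getElem
  · simp
  · intro i h1 h2
    simp only [List.length_map, List.length_range] at h1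
    simp [List.getElem_reverse]

-- A's value on inputs Pre_ admits: flatten of the columns in reverse order
lemma portA_eq (arr : List (List Int)) (n : Nat)
    (hne : arr ≠ []) (hn : (arr.headD []).length = n)
    (h : ∀ row ∈ arr, n ≤ row.length) :
    left_2d_arr arr = ((List.range n).reverse.map (pvCol arr)).flatten := by
  obtain ⟨r, rest, rfl⟩ : ∃ r rest, arr = r :: rest := by
    cases arr with | nil => exact absurd rfl hne | cons a b => exact ⟨a, b, rfl⟩
  simp only [List.headD_cons] at hn
  unfold left_2d_arr
  simp only [PySem.List.pyGet?_zero_cons, Option.getD_some, hn]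
  have hinner : (fun (out : List Int) (i : Int) =>
      (PySem.List.pyRange 0 ((r :: rest).length : Int) 1).foldl
        (fun out j => out ++ [PySem.List.pyGetD (PySem.List.pyGetD (r :: rest) j []) ((n : Int) - 1 - i) 0]) out)
      = (fun out i => out ++ (r :: rest).map (fun row => PySem.List.pyGetD row ((n : Int) - 1 - i) 0)) := by
    funext out i
    rw [PySem.List.foldl_pyRange_zero_pyGetD' (r :: rest) []
      (fun acc row => acc ++ [PySem.List.pyGetD row ((n : Int) - 1 - i) 0]) out]
    rw [PySem.List.foldl_append_singleton_eq_map]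
  rw [hinner, PySem.List.foldl_append_eq_flatMap, List.nil_append]
  rw [PySem.List.pyRange_zero_nat, List.flatMap_map]
  rw [← map_sub_range, List.map_map, ← List.flatMap_def]
  apply List.flatMap_congr
  intro k hk
  simp only [List.mem_range] at hk
  have hcast : (n : Int) - 1 - (k : Int) = ((n - 1 - k : Nat) : Int) := by omega
  rw [hcast]
  unfold pvCol
  apply List.map_congr_left
  intro row hrow
  rw [PySem.List.pyGetD_natCast]

-- B's value: the same flatten of reversed columns
lemma portB_eq (arr : List (List Int)) (n : Nat)
    (hne : arr ≠ []) (hn : (arr.headD []).length = n)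
    (h : ∀ row ∈ arr, n ≤ row.length) :
    left_2d_arr_alt arr = ((List.range n).reverse.map (pvCol arr)).flatten := by
  obtain ⟨r, rest, rfl⟩ : ∃ r rest, arr = r :: rest := by
    cases arr with | nil => exact absurd rfl hne | cons a b => exact ⟨a, b, rfl⟩
  simp only [List.headD_cons] at hn
  unfold left_2d_arr_alt
  simp only [PySem.List.pyGet?_zero_cons, Option.getD_some, hn]
  have hlen0 : ((PySem.List.pyRange 0 (n : Int) 1).map (fun _ => ([] : List Int))).length = n := by
    simp [PySem.List.length_pyRange_one]
  rw [foldl_cols (r :: rest) n _ hlen0 h]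
  have hcols : (List.range n).map
      (fun k => ((PySem.List.pyRange 0 (n : Int) 1).map (fun _ => ([] : List Int))).getD k [] ++ pvCol (r :: rest) k)
      = (List.range n).map (pvCol (r :: rest)) := by
    apply List.map_congr_left
    intro k _
    rw [getD_map_const]
    simp
  rw [hcols, PySem.List.foldl_append_eq_flatten, List.nil_append, ← List.map_reverse]

-- ===== VERDICT (by name: the statement is the Claim_ definition above) =====
theorem left_2d_arr_spec : Claim_equal_left_2d_arr := by
  intro arr _ hpre
  obtain ⟨hne, hrows⟩ := hpre
  unfold Spec_left_2d_arr
  rw [portA_eq arr (arr.headD []).length hne rfl hrows,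
      portB_eq arr (arr.headD []).length hne rfl hrows]
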